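-- pv_equiv track=rewrite | github.com/Open-CP/OCP | matrix.py | matrix_power_mod2
-- ===== SOURCE A (Python) =====
-- def matrix_multiply_mod2(A, B): # Multiply two matrices in GF(2) (mod 2).
--     size = len(A)
--     result = [[0 for _ in range(size)] for _ in range(size)]
--     for i in range(size):
--         for j in range(size):
--             result[i][j] = sum(A[i][k] * B[k][j] for k in range(size)) % 2
--     return result
--
-- def matrix_power_mod2(matrix, power): # Compute the power of a matrix (mod 2).
--     size = len(matrix)
--     result = [[1 if i == j else 0 for j in range(size)] for i in range(size)]  # Identity matrix.
--     base = matrix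
--     while power:
--         if power % 2 == 1:
--             result = matrix_multiply_mod2(result, base)
--         base = matrix_multiply_mod2(base, base)
--         power //= 2
--     return result
-- ===== SOURCE B (Python) =====
-- def matrix_power_mod2(matrix, power):  # Repeated multiplication by GF(2) row combination.
--     size = len(matrix)
--     m2 = [[x % 2 for x in row[:size]] for row in matrix]
--     result = [[1 if i == j else 0 for j in range(size)] for i in range(size)]
--     for _ in range(power):
--         new = []
--         for row in result:
--             acc = [0] * size
--             for k in range(size):
--                 if row[k]:
--                     acc = [(acc[j] + m2[k][j]) % 2 for j in range(size)]
--             new.append(acc)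
--         result = new
--     return result
-- ===== Notes on version B (the rewrite author's own statement) =====
-- stated objective: alternative
-- what changed: Binary exponentiation with an (i,j,k) dot-product multiply is replaced by a flat loop of `power` plain multiplications, each performed as a GF(2) row combination: the matrix is reduced mod 2 once, and each result row is rebuilt by accumulating (mod-2 adding) the matrix rows selected by its nonzero entries, with no inner dot-product scan.
import Mathlib
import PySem

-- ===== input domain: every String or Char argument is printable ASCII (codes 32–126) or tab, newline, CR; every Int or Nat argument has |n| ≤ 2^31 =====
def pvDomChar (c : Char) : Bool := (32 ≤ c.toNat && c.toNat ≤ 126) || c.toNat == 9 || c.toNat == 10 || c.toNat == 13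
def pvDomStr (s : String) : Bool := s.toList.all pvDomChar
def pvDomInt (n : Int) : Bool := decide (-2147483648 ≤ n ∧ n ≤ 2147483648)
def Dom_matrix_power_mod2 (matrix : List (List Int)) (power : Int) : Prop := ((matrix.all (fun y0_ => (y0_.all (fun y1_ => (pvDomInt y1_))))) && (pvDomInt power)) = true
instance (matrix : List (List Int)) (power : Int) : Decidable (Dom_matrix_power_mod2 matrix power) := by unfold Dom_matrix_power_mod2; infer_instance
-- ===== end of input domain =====

-- B replaces A's binary exponentiation + dot-product multiply by a flat loop of `power`
-- GF(2) row-combination multiplications over the once-reduced matrix (alternative algorithm).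


-- ===== PORT A =====
-- matrix_multiply_mod2: A's helper; indices are in range inside Pre_,
-- so Python's A[i][k] is ported with getD (Python raises IndexError out of range: excluded by Pre_).
def matmul2 (A B : List (List Int)) : List (List Int) :=
  (List.range A.length).map (fun i =>
    (List.range A.length).map (fun j =>
      PySem.Int.mod
        ((List.range A.length).foldl
          (fun s k => s + (A.getD i []).getD k 0 * (B.getD k []).getD j 0) 0) 2))

-- the `while power:` loop; the `0 < power` guard makes it total: for negative power the
-- Python loop diverges (those inputs are excluded by Pre_).
def powLoopA (result base : List (List Int)) (power : Int) : List (List Int) :=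
  if _h : 0 < power then
    powLoopA (if PySem.Int.mod power 2 = 1 then matmul2 result base else result)
      (matmul2 base base) (PySem.Int.floordiv power 2)
  else result
termination_by power.toNat
decreasing_by
  have := PySem.Int.floordiv_eq_ediv_of_pos (a := power) (b := 2) (by omega)
  omega

def matrix_power_mod2 (matrix : List (List Int)) (power : Int) : List (List Int) :=
  powLoopA
    ((List.range matrix.length).map (fun i =>
      (List.range matrix.length).map (fun j => if i = j then (1 : Int) else 0)))
    matrix power

-- ===== PORT B =====
-- `[[x % 2 for x in row[:size]] for row in matrix]`
def reduceB (matrix : List (List Int)) (n : Nat) : List (List Int) :=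
  matrix.map (fun row => (row.take n).map (fun x => PySem.Int.mod x 2))

-- inner loop: rebuild one result row as a mod-2 combination of the selected rows of m2
def rowCombine (m2 : List (List Int)) (n : Nat) (row : List Int) : List Int :=
  (List.range n).foldl
    (fun acc k =>
      if row.getD k 0 ≠ 0 then
        (List.range n).map (fun j =>
          PySem.Int.mod (acc.getD j 0 + (m2.getD k []).getD j 0) 2)
      else acc)
    (List.replicate n (0 : Int))

-- identity matrix, as Source B builds it
def identB (n : Nat) : List (List Int) :=
  (List.range n).map (fun i => (List.range n).map (fun j => if i = j then (1 : Int) else 0))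

def matrix_power_mod2_alt (matrix : List (List Int)) (power : Int) : List (List Int) :=
  (PySem.List.pyRange 0 power 1).foldl
    (fun result _ => result.map (rowCombine (reduceB matrix matrix.length) matrix.length))
    (identB matrix.length)

-- ===== PRECONDITION & SPEC =====
-- Pre_ excludes exactly the inputs where Python A does not return: negative power (the
-- `while power` loop diverges) and power ≥ 1 with a row shorter than the matrix (IndexError).
def Pre_matrix_power_mod2 (matrix : List (List Int)) (power : Int) : Prop :=
  0 ≤ power ∧ (power = 0 ∨ ∀ r ∈ matrix, matrix.length ≤ r.length)
instance (matrix : List (List Int)) (power : Int) : Decidable (Pre_matrix_power_mod2 matrix power) := by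
  unfold Pre_matrix_power_mod2; infer_instance

def pvWitness_matrix_power_mod2 : List (List Int) × Int := ([[1, 0], [1, 1]], 3)

def Spec_matrix_power_mod2 (matrix : List (List Int)) (power : Int) (out : List (List Int)) : Prop := out = matrix_power_mod2_alt matrix power
instance (matrix : List (List Int)) (power : Int) (out : List (List Int)) : Decidable (Spec_matrix_power_mod2 matrix power out) := by unfold Spec_matrix_power_mod2; infer_instance

-- ===== CLAIM (what is proved, stated in full; the proofs are below) =====
def Claim_equal_matrix_power_mod2 : Prop := ∀ (matrix : List (List Int)) (power : Int), Dom_matrix_power_mod2 matrix power → Pre_matrix_power_mod2 matrix power → Spec_matrix_power_mod2 matrix power (matrix_power_mod2 matrix power)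

-- ===== LEMMAS AND PROOFS =====

-- abstract semantics: a list matrix as a Mathlib matrix over ZMod 2, and back
def phi (n : Nat) (M : List (List Int)) : Matrix (Fin n) (Fin n) (ZMod 2) :=
  Matrix.of fun i j => (((M.getD i []).getD j 0 : Int) : ZMod 2)

def rowOf (n : Nat) (v : Fin n → ZMod 2) : List Int :=
  (List.finRange n).map (fun j => ((v j).val : Int))

def psi (n : Nat) (X : Matrix (Fin n) (Fin n) (ZMod 2)) : List (List Int) :=
  (List.finRange n).map (fun i => rowOf n (X i))

theorem matmul2_length (A B : List (List Int)) : (matmul2 A B).length = A.length := by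
  simp [matmul2]

theorem foldl_add_map (f : Nat → Int) (l : List Nat) (init : Int) :
    l.foldl (fun s k => s + f k) init = init + (l.map f).sum := by
  induction l generalizing init with
  | nil => simp
  | cons x xs ih => simp [ih, add_assoc]

theorem rowOf_getD (n : Nat) (v : Fin n → ZMod 2) (k : Nat) (h : k < n) :
    (rowOf n v).getD k 0 = ((v ⟨k, h⟩).val : Int) := by
  rw [List.getD_eq_getElem _ _ (by simp [rowOf]; exact h)]
  simp [rowOf]

theorem phi_psi (n : Nat) (X : Matrix (Fin n) (Fin n) (ZMod 2)) : phi n (psi n X) = X := by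
  ext i j
  have : ((psi n X).getD i []).getD j 0 = ((X i j).val : Int) := by
    rw [show (psi n X).getD i [] = rowOf n (X i) by
      rw [List.getD_eq_getElem _ _ (by simp [psi])]; simp [psi]]
    exact rowOf_getD n (X i) j j.isLt
  simp only [phi, Matrix.of_apply]
  rw [this]
  push_cast
  simp [ZMod.natCast_val, ZMod.cast_id]

theorem sum_map_range (f : Nat → Int) (n : Nat) :
    ((List.range n).map f).sum = ∑ k ∈ Finset.range n, f k := by
  induction n with
  | zero => simp
  | succ k ih => simp [List.range_succ, Finset.sum_range_succ, ih]

theorem hcast2 (s : Int) : s % 2 = (((s : ZMod 2)).val : Int) := by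
  rw [ZMod.val_intCast]; norm_num

theorem matmul2_eq (n : Nat) (A B : List (List Int)) (hA : A.length = n) :
    matmul2 A B = psi n (phi n A * phi n B) := by
  subst hA
  apply List.ext_getElem
  · simp [matmul2, psi]
  · intro i h1 h2
    apply List.ext_getElem
    · simp [matmul2, psi, rowOf]
    · intro j hj1 hj2
      simp only [matmul2, psi, rowOf, List.getElem_map, List.getElem_range, List.getElem_finRange]
      rw [PySem.Int.mod_eq_emod_of_pos (by norm_num : (0:Int) < 2)]
      rw [foldl_add_map, zero_add, sum_map_range]
      rw [hcast2]
      congr 1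
      rw [Matrix.mul_apply]
      have := Fin.sum_univ_eq_sum_range
        (fun k => (((A.getD i []).getD k 0 : Int) : ZMod 2) *
          (((B.getD k []).getD j 0 : Int) : ZMod 2)) A.length
      simp only [phi, Matrix.of_apply, Fin.val_cast]
      rw [this]
      push_cast
      rfl

theorem identB_eq (n : Nat) : identB n = psi n 1 := by
  apply List.ext_getElem
  · simp [identB, psi]
  · intro i h1 h2
    apply List.ext_getElem
    · simp [identB, psi, rowOf]
    · intro j hj1 hj2
      simp only [identB, psi, rowOf, List.getElem_map, List.getElem_range]
      rw [Matrix.one_apply]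
      by_cases h : i = j
      · simp [h, ZMod.val_one]
      · simp [h, Fin.ext_iff]

theorem phi_identB (n : Nat) : phi n (identB n) = 1 := by
  rw [identB_eq, phi_psi]

-- A's binary-exponentiation loop computes ψ(φ R · φ B ^ m) for positive exponents
theorem powLoopA_eq (n : Nat) (m : Nat) :
    ∀ R Bm : List (List Int), 0 < m → R.length = n → Bm.length = n →
    powLoopA R Bm (m : Int) = psi n (phi n R * phi n Bm ^ m) := by
  induction m using Nat.strong_induction_on with
  | _ m ih =>
    intro R Bm hm hR hB
    rw [powLoopA]
    have hmod : PySem.Int.mod (m : Int) 2 = ((m % 2 : Nat) : Int) := PySem.Int.mod_natCast m 2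
    have hdiv : PySem.Int.floordiv (m : Int) 2 = ((m / 2 : Nat) : Int) := PySem.Int.floordiv_natCast m 2
    simp only [hm, Int.natCast_pos, dif_pos, hmod, hdiv]
    by_cases h1 : m / 2 = 0
    · -- m = 1 : one multiplication, recursion stops
      have hm1 : m = 1 := by omega
      subst hm1
      rw [powLoopA]
      simp [matmul2_eq n R Bm hR]
    · have hrec : 0 < m / 2 := Nat.pos_of_ne_zero h1
      have hlt : m / 2 < m := Nat.div_lt_self hm (by norm_num)
      by_cases hodd : m % 2 = 1
      · rw [if_pos (by rw [hodd]; rfl)]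
        rw [ih (m / 2) hlt (matmul2 R Bm) (matmul2 Bm Bm) hrec
          (by rw [matmul2_length, hR]) (by rw [matmul2_length, hB])]
        rw [matmul2_eq n R Bm hR, matmul2_eq n Bm Bm hB, phi_psi, phi_psi]
        congr 1
        have hBm : phi n Bm * phi n Bm = phi n Bm ^ 2 := (sq (phi n Bm)).symm
        rw [hBm, ← pow_mul, mul_assoc, ← pow_succ']
        have hexp : 2 * (m / 2) + 1 = m := by omega
        rw [hexp]
      · have heven : m % 2 = 0 := by omega
        rw [if_neg (by rw [heven]; simp)]
        rw [ih (m / 2) hlt R (matmul2 Bm Bm) hrec hR (by rw [matmul2_length, hB])]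
        rw [matmul2_eq n Bm Bm hB, phi_psi]
        congr 1
        have hBm : phi n Bm * phi n Bm = phi n Bm ^ 2 := (sq (phi n Bm)).symm
        rw [hBm, ← pow_mul]
        have hexp : 2 * (m / 2) = m := by omega
        rw [hexp]

-- ---------- B side ----------

theorem zmod2_cases : ∀ a : ZMod 2, a = 0 ∨ a = 1 := by decide

theorem reduceB_get (matrix : List (List Int)) (k j : Nat)
    (hk : k < matrix.length) (hj : j < matrix.length)
    (hrows : ∀ r ∈ matrix, matrix.length ≤ r.length) :
    (((reduceB matrix matrix.length).getD k []).getD j 0)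
      = PySem.Int.mod (((matrix.getD k []).getD j 0)) 2 := by
  have hrowlen : matrix.length ≤ (matrix[k]).length := hrows _ (List.getElem_mem hk)
  have hmk : matrix.getD k [] = matrix[k] := List.getD_eq_getElem _ _ hk
  rw [hmk]
  rw [show (reduceB matrix matrix.length).getD k []
      = ((matrix[k]).take matrix.length).map (fun x => PySem.Int.mod x 2) by
    rw [List.getD_eq_getElem _ _ (by simp [reduceB]; exact hk)]; simp [reduceB]]
  rw [List.getD_eq_getElem _ _ (by simp; omega)]
  rw [List.getD_eq_getElem _ _ (by omega)]
  simp [List.getElem_take]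

theorem entry_step (w : ZMod 2) (e : Int) :
    PySem.Int.mod ((w.val : Int) + PySem.Int.mod e 2) 2 = ((w + (e : ZMod 2)).val : Int) := by
  rw [PySem.Int.mod_eq_emod_of_pos (by norm_num : (0:Int) < 2),
      PySem.Int.mod_eq_emod_of_pos (by norm_num : (0:Int) < 2), hcast2]
  have hmod2 : (((e % 2 : Int)) : ZMod 2) = (e : ZMod 2) := by
    exact_mod_cast ZMod.intCast_mod e 2
  have key : (((w.val : Int) + e % 2 : Int) : ZMod 2) = w + (e : ZMod 2) := by
    push_cast
    rw [hmod2]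
    simp [ZMod.natCast_val, ZMod.cast_id]
  rw [key]

theorem rowOf_getElem (n : Nat) (v : Fin n → ZMod 2) (j : Nat)
    (h1 : j < (rowOf n v).length) (h2 : j < n) :
    (rowOf n v)[j] = ((v ⟨j, h2⟩).val : Int) := by
  simp [rowOf]

theorem map_range_eq_rowOf (n : Nat) (F : Nat → Int) (w' : Fin n → ZMod 2)
    (h : ∀ (j : Nat) (hj : j < n), F j = ((w' ⟨j, hj⟩).val : Int)) :
    (List.range n).map F = rowOf n w' := by
  apply List.ext_getElem
  · simp [rowOf]
  · intro j hj1 hj2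
    have hjn : j < n := by simpa using hj1
    rw [List.getElem_map, List.getElem_range, rowOf_getElem n w' j hj2 hjn, h j hjn]

-- fold invariant for rowCombine's loop
theorem rowCombine_fold (matrix : List (List Int))
    (hrows : ∀ r ∈ matrix, matrix.length ≤ r.length)
    (v : Fin matrix.length → ZMod 2) (t : Nat) (ht : t ≤ matrix.length)
    (w : Fin matrix.length → ZMod 2) :
    (List.range t).foldl
      (fun acc k =>
        if (rowOf matrix.length v).getD k 0 ≠ 0 then
          (List.range matrix.length).map (fun j =>
            PySem.Int.mod (acc.getD j 0 + ((reduceB matrix matrix.length).getD k []).getD j 0) 2)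
        else acc)
      (rowOf matrix.length w)
    = rowOf matrix.length (fun j => w j + ∑ k ∈ Finset.range t,
        (if h : k < matrix.length then
          (if v ⟨k, h⟩ ≠ 0 then phi matrix.length matrix ⟨k, h⟩ j else 0) else 0)) := by
  induction t generalizing w with
  | zero => simp
  | succ t ih =>
    rw [List.range_succ, List.foldl_append, ih (by omega)]
    have htn : t < matrix.length := by omega
    simp only [List.foldl_cons, List.foldl_nil]
    rw [rowOf_getD matrix.length v t htn]
    by_cases hv : v ⟨t, htn⟩ ≠ 0
    · rw [if_pos (by exact_mod_cast fun h => hv ((ZMod.val_eq_zero _).mp (by exact_mod_cast h)))]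
      apply map_range_eq_rowOf
      intro j hjn
      rw [rowOf_getD _ _ j hjn, reduceB_get matrix t j htn hjn hrows, entry_step]
      congr 2
      rw [Finset.sum_range_succ, dif_pos htn, if_pos hv, ← add_assoc]
      congr 1
    · rw [if_neg (by
        simp only [ne_eq, not_not] at hv ⊢
        exact_mod_cast congrArg (fun a : ZMod 2 => (a.val : Int)) hv)]
      congr 1
      funext j
      rw [Finset.sum_range_succ, dif_pos htn, if_neg hv, add_zero]

theorem replicate_eq_rowOf (n : Nat) :
    List.replicate n (0 : Int) = rowOf n (fun _ => 0) := by
  apply List.ext_getElem <;> simp [rowOf]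

theorem rowCombine_eq (matrix : List (List Int))
    (hrows : ∀ r ∈ matrix, matrix.length ≤ r.length)
    (v : Fin matrix.length → ZMod 2) :
    rowCombine (reduceB matrix matrix.length) matrix.length (rowOf matrix.length v)
      = rowOf matrix.length (fun j => ∑ k, v k * phi matrix.length matrix k j) := by
  unfold rowCombine
  rw [replicate_eq_rowOf,
    rowCombine_fold matrix hrows v matrix.length (le_refl _) (fun _ => 0)]
  congr 1
  funext j
  rw [zero_add]
  rw [← Fin.sum_univ_eq_sum_range (fun k =>
    (if h : k < matrix.length then
      (if v ⟨k, h⟩ ≠ 0 then phi matrix.length matrix ⟨k, h⟩ j else 0) else 0)) matrix.length]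
  apply Finset.sum_congr rfl
  intro k _
  rw [dif_pos k.isLt]
  rcases zmod2_cases (v k) with h | h <;> simp [Fin.eta, h]

theorem stepB_eq (matrix : List (List Int))
    (hrows : ∀ r ∈ matrix, matrix.length ≤ r.length)
    (X : Matrix (Fin matrix.length) (Fin matrix.length) (ZMod 2)) :
    (psi matrix.length X).map (rowCombine (reduceB matrix matrix.length) matrix.length)
      = psi matrix.length (X * phi matrix.length matrix) := by
  unfold psi
  rw [List.map_map]
  apply List.map_congr_left
  intro i _
  simp only [Function.comp]
  rw [rowCombine_eq matrix hrows (X i)]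
  congr 1

-- B's flat loop: fold over a list of length m = m-fold iteration
theorem foldl_const_iterate {α β : Type} (g : α → α) (l : List β) (init : α) :
    l.foldl (fun r _ => g r) init = g^[l.length] init := by
  induction l generalizing init with
  | nil => simp
  | cons x xs ih => simp [ih, Function.iterate_succ_apply]

theorem iterB_eq (matrix : List (List Int))
    (hrows : ∀ r ∈ matrix, matrix.length ≤ r.length) (m : Nat) :
    (fun R => R.map (rowCombine (reduceB matrix matrix.length) matrix.length))^[m]
        (identB matrix.length)
      = psi matrix.length (phi matrix.length matrix ^ m) := by
  induction m with
  | zero => simp [identB_eq]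
  | succ k ihk =>
    rw [Function.iterate_succ_apply', ihk, stepB_eq matrix hrows, ← pow_succ]

-- ===== VERDICT (by name: the statement is the Claim_ definition above) =====
theorem matrix_power_mod2_spec : Claim_equal_matrix_power_mod2 := by
  intro matrix power _ hpre
  unfold Spec_matrix_power_mod2 matrix_power_mod2 matrix_power_mod2_alt
  obtain ⟨hp, hrows⟩ := hpre
  lift power to Nat using hp with m
  rw [foldl_const_iterate, PySem.List.length_pyRange_one]
  have hlen : ((m : Int) - 0).toNat = m := by omega
  rw [hlen]
  by_cases h0 : m = 0
  · subst h0
    rw [powLoopA]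
    norm_num
    rfl
  · have hrows' : ∀ r ∈ matrix, matrix.length ≤ r.length := by
      rcases hrows with h | h
      · exact absurd (by exact_mod_cast h) h0
      · exact h
    rw [show ((List.range matrix.length).map (fun i =>
        (List.range matrix.length).map (fun j => if i = j then (1 : Int) else 0)))
        = identB matrix.length from rfl]
    rw [powLoopA_eq matrix.length m (identB matrix.length) matrix
      (Nat.pos_of_ne_zero h0) (by simp [identB]) rfl]
    rw [iterB_eq matrix hrows' m, phi_identB, one_mul]
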